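-- pv_equiv track=rewrite | github.com/Leovattoly/Python-intermediate-works | Pairs_python/code.py | solution
-- ===== SOURCE A (Python) =====
-- def solution(A):
--     k = 0
--     # dictionary for storing count each element
--     value_dict = dict()
--     # looping throug the given A
--     for i in range(len(A)):
--         a= 0
--         for j in range(len(A)):
--             # finding the identical pairs
--             if(A[i] == A[j] and i != j):
--                 a = a+1
--
--         value_dict [A[i]] = a*2
--     # splitting the dictionary
--     values = []
--     items = value_dict.items()
--     for item in items:
--         values.append(item[1])
--     # sorting the calues in ascending order
--     values.sort()
--     # returning the last element
--     return (values[-1])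
-- ===== SOURCE B (Python) =====
-- def solution(A):
--     # Sort once, then find the longest run of equal values in a single pass;
--     # that run length is the maximum multiplicity, and the answer is 2*(it-1).
--     s = sorted(A)
--     prev = s[0]
--     best = 1
--     cur = 1
--     for x in s[1:]:
--         if x == prev:
--             cur += 1
--         else:
--             cur = 1
--         if cur > best:
--             best = cur
--         prev = x
--     return 2 * (best - 1)
-- ===== Notes on version B (the rewrite author's own statement) =====
-- stated objective: faster
-- what changed: Replaces the O(n^2) nested pair-counting loop plus dict and sort-of-values with a single sort followed by one run-length pass over the sorted list, returning 2*(max multiplicity - 1).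
import Mathlib
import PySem

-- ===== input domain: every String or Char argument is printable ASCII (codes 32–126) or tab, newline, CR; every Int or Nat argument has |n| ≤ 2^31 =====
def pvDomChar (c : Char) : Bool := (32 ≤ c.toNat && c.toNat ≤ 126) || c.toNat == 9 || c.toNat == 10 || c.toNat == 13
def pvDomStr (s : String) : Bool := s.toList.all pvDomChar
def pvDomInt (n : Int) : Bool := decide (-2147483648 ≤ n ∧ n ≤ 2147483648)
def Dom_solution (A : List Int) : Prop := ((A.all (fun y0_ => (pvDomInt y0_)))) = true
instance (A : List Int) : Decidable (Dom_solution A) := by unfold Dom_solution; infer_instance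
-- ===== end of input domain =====

-- B sorts once and takes the longest run of equal values in one pass (2*(max multiplicity - 1)),
-- replacing A's quadratic pair counting; equivalence proved on nonempty lists (A raises on []).

-- ===== PORT A =====
def solution (A : List Int) : Int :=
  let n : Int := (A.length : Int)
  let value_dict := (PySem.List.pyRange 0 n 1).foldl (fun d i =>
      let a : Int := (PySem.List.pyRange 0 n 1).foldl (fun a j =>
          if PySem.List.pyGetD A i 0 = PySem.List.pyGetD A j 0 ∧ i ≠ j then a + 1 else a) 0
      d.insert (PySem.List.pyGetD A i 0) (a * 2)) (PySem.Dict.empty : PySem.Dict Int Int)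
  let values := value_dict.items.foldl (fun acc item => acc ++ [item.2]) ([] : List Int)
  let values := PySem.List.sorted values (fun x => x) false
  (PySem.List.pyGet? values (-1)).getD 0   -- values[-1]; Pre_ excludes A = [], where Python raises IndexError

-- ===== PORT B =====
def solution_alt (A : List Int) : Int :=
  let s := PySem.List.sorted A (fun x => x) false
  let prev := PySem.List.pyGetD s 0 0   -- s[0]; Pre_ excludes the empty list, where Python raises IndexError
  let st := (PySem.List.slice s (some 1) none).foldl
      (fun (st : Int × Int × Int) x =>
        let cur := if x = st.1 then st.2.2 + 1 else (1 : Int)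
        let best := if cur > st.2.1 then cur else st.2.1
        (x, best, cur)) (prev, 1, 1)
  2 * (st.2.1 - 1)

-- ===== PRECONDITION & SPEC =====
-- Pre_ excludes exactly the empty list, on which both Pythons raise IndexError.
def Pre_solution (A : List Int) : Prop := A ≠ []
instance (A : List Int) : Decidable (Pre_solution A) := by unfold Pre_solution; infer_instance
def pvWitness_solution : List Int := [1, 2, 2]
def Spec_solution (A : List Int) (out : Int) : Prop := out = solution_alt A
instance (A : List Int) (out : Int) : Decidable (Spec_solution A out) := by unfold Spec_solution; infer_instance

-- ===== CLAIM (what is proved, stated in full; the proofs are below) =====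
def Claim_equal_solution : Prop := ∀ (A : List Int), Dom_solution A → Pre_solution A → Spec_solution A (solution A)

-- ===== LEMMAS AND PROOFS =====

-- "m is the maximal multiplicity of an element of l" (witnessed, so unique)
def IsMaxCount (l : List Int) (m : Int) : Prop :=
  (∃ x ∈ l, (l.count x : Int) = m) ∧ ∀ x ∈ l, (l.count x : Int) ≤ m

theorem isMaxCount_unique {l : List Int} {m m' : Int}
    (h : IsMaxCount l m) (h' : IsMaxCount l m') : m = m' := by
  obtain ⟨⟨x, hx, hxm⟩, hub⟩ := h
  obtain ⟨⟨y, hy, hym⟩, hub'⟩ := h'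
  have h1 := hub' x hx
  have h2 := hub y hy
  omega

-- the last element of a ≤-sorted list bounds every element
theorem pairwise_le_getLast {l : List Int} (hs : l.Pairwise (· ≤ ·)) (h : l ≠ []) :
    ∀ y ∈ l, y ≤ l.getLast h := by
  induction l with
  | nil => simp at h
  | cons a t ih =>
    rcases List.pairwise_cons.mp hs with ⟨ha, ht⟩
    intro y hy
    cases t with
    | nil => simp at hy; simp [hy]
    | cons b u =>
      rw [List.getLast_cons (by simp)]
      rcases List.mem_cons.mp hy with rfl | hy
      · exact ha _ (List.getLast_mem (by simp))
      · exact ih ht (by simp) y hy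

-- ----- A-side characterisation -----

theorem count_map_eq_countP (l : List Int) (f : Int → Int) (v : Int) :
    (l.map f).count v = l.countP (fun j => f j == v) := by
  rw [List.count, List.countP_map]
  rfl

theorem inner_countP (A : List Int) (i : Int) (h0 : 0 ≤ i) (h1 : i < (A.length : Int)) :
    ((PySem.List.pyRange 0 (A.length : Int) 1).countP
      (fun j => decide (PySem.List.pyGetD A i 0 = PySem.List.pyGetD A j 0 ∧ i ≠ j))) + 1
    = A.count (PySem.List.pyGetD A i 0) := by
  have hsplit : PySem.List.pyRange 0 (A.length : Int) 1
      = PySem.List.pyRange 0 i 1 ++ (i :: PySem.List.pyRange (i + 1) (A.length : Int) 1) := by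
    rw [PySem.List.pyRange_one_append 0 i _ h0 (le_of_lt h1), PySem.List.pyRange_one_cons h1]
  have hmap : (PySem.List.pyRange 0 (A.length : Int) 1).map (fun j => PySem.List.pyGetD A j 0) = A :=
    PySem.List.map_pyGetD_pyRange_zero A 0
  have hcountv : ∀ v : Int, A.count v
      = (PySem.List.pyRange 0 (A.length : Int) 1).countP
          (fun j => PySem.List.pyGetD A j 0 == v) := by
    intro v
    conv_lhs => rw [← hmap]
    rw [count_map_eq_countP]
  have hcount := hcountv (PySem.List.pyGetD A i 0)
  have hcong : ∀ j : Int, i ≠ j →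
      (decide (PySem.List.pyGetD A i 0 = PySem.List.pyGetD A j 0 ∧ i ≠ j))
        = (PySem.List.pyGetD A j 0 == PySem.List.pyGetD A i 0) := by
    intro j hij
    by_cases hh : PySem.List.pyGetD A i 0 = PySem.List.pyGetD A j 0
    · simp [hh, hij]
    · have hh' : PySem.List.pyGetD A j 0 ≠ PySem.List.pyGetD A i 0 := fun e => hh e.symm
      simp [hh, hh']
  have hL : ∀ j ∈ PySem.List.pyRange 0 i 1, i ≠ j := by
    intro j hj
    have := (PySem.List.mem_pyRange_one.mp hj).2
    omega
  have hR : ∀ j ∈ PySem.List.pyRange (i + 1) (A.length : Int) 1, i ≠ j := by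
    intro j hj
    have := (PySem.List.mem_pyRange_one.mp hj).1
    omega
  have hLc : List.countP
        (fun j => decide (PySem.List.pyGetD A i 0 = PySem.List.pyGetD A j 0 ∧ i ≠ j))
        (PySem.List.pyRange 0 i 1)
      = List.countP (fun j => PySem.List.pyGetD A j 0 == PySem.List.pyGetD A i 0)
        (PySem.List.pyRange 0 i 1) :=
    List.countP_congr (fun j hj => by rw [hcong j (hL j hj)])
  have hRc : List.countP
        (fun j => decide (PySem.List.pyGetD A i 0 = PySem.List.pyGetD A j 0 ∧ i ≠ j))
        (PySem.List.pyRange (i + 1) (A.length : Int) 1)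
      = List.countP (fun j => PySem.List.pyGetD A j 0 == PySem.List.pyGetD A i 0)
        (PySem.List.pyRange (i + 1) (A.length : Int) 1) :=
    List.countP_congr (fun j hj => by rw [hcong j (hR j hj)])
  rw [hcount, hsplit]
  simp only [List.countP_append, List.countP_cons]
  rw [hLc, hRc]
  have e1 : (decide (True ∧ i ≠ i)) = false := by simp
  have e2 : (PySem.List.pyGetD A i 0 == PySem.List.pyGetD A i 0) = true := by simp
  rw [e1, e2]
  simp
  omega

theorem getD_foldl_insert_const (g : Int → Int) (A : List Int) (d : PySem.Dict Int Int) (k : Int) :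
    (A.foldl (fun d x => d.insert x (g x)) d).getD k 0 = if k ∈ A then g k else d.getD k 0 := by
  induction A generalizing d with
  | nil => simp
  | cons x t ih =>
    simp only [List.foldl_cons, ih, PySem.Dict.getD_insert, List.mem_cons]
    split_ifs with a b c d e <;> first | rfl | omega | (subst_vars; rfl) | tauto

theorem items_eq_keys_map (D : PySem.Dict Int Int) (hn : D.keys.Nodup) :
    D.items = D.keys.map (fun k => (k, D.getD k 0)) := by
  have : D.items = D.items.map (fun p => (p.1, D.getD p.1 0)) := by
    conv_lhs => rw [← List.map_id D.items]
    apply List.map_congr_left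
    intro p hp
    have := PySem.Dict.getD_of_mem_items (d := D) (k := p.1) (v := p.2) (d0 := 0) (by cases p; exact hp) hn
    simp [this]
  rw [this, PySem.Dict.keys, List.map_map]
  rfl

theorem solution_char (A : List Int) (h : A ≠ []) :
    ∃ m : Int, IsMaxCount A m ∧ solution A = (m - 1) * 2 := by
  have hin : ∀ i : Int, 0 ≤ i → i < (A.length : Int) →
      (PySem.List.pyRange 0 (A.length : Int) 1).foldl (fun a j =>
          if PySem.List.pyGetD A i 0 = PySem.List.pyGetD A j 0 ∧ i ≠ j then a + 1 else a) (0 : Int)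
      = (A.count (PySem.List.pyGetD A i 0) : Int) - 1 := by
    intro i hi0 hi1
    rw [PySem.List.foldl_ite_add_one]
    have := inner_countP A i hi0 hi1
    omega
  have hD : (PySem.List.pyRange 0 ((A.length : Int)) 1).foldl (fun d i =>
        let a : Int := (PySem.List.pyRange 0 ((A.length : Int)) 1).foldl (fun a j =>
            if PySem.List.pyGetD A i 0 = PySem.List.pyGetD A j 0 ∧ i ≠ j then a + 1 else a) 0
        d.insert (PySem.List.pyGetD A i 0) (a * 2)) (PySem.Dict.empty : PySem.Dict Int Int)
      = A.foldl (fun d x => d.insert x (((A.count x : Int) - 1) * 2)) PySem.Dict.empty := by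
    rw [PySem.List.foldl_congr_mem (g := fun d i =>
        d.insert (PySem.List.pyGetD A i 0) (((A.count (PySem.List.pyGetD A i 0) : Int) - 1) * 2))]
    · exact PySem.List.foldl_pyRange_zero_pyGetD A 0
        (fun d x => d.insert x (((A.count x : Int) - 1) * 2)) PySem.Dict.empty
    · intro d i hi
      obtain ⟨hi0, hi1⟩ := PySem.List.mem_pyRange_one.mp hi
      simp only
      rw [hin i hi0 hi1]
  have hnodup : ∀ g : Int → Int, (A.foldl (fun d x => d.insert x (g x))
      (PySem.Dict.empty : PySem.Dict Int Int)).keys.Nodup := by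
    intro g
    apply PySem.Dict.nodup_keys_foldl_insert
    simp
  have hvalues : ∀ g : Int → Int,
      ((A.foldl (fun d x => d.insert x (g x)) (PySem.Dict.empty : PySem.Dict Int Int)).items.foldl
        (fun acc item => acc ++ [item.2]) ([] : List Int))
      = (PySem.Set.ofList A).map g := by
    intro g
    rw [PySem.List.foldl_append_singleton_eq_map, items_eq_keys_map _ (hnodup g),
      PySem.Dict.keys_foldl_insert]
    have hk : PySem.Set.update (PySem.Dict.empty : PySem.Dict Int Int).keys A
        = PySem.Set.ofList A := by
      simp [PySem.Set.update, PySem.Set.ofList_eq_foldl]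
    rw [hk, List.map_map]
    simp only [List.nil_append]
    apply List.map_congr_left
    intro k hk
    have hkA : k ∈ A := (PySem.Set.mem_ofList _ _).mp hk
    simp only [Function.comp]
    rw [getD_foldl_insert_const]
    simp [hkA]
  have hsol : solution A = (PySem.List.pyGet? (PySem.List.sorted
      ((PySem.Set.ofList A).map (fun k => ((A.count k : Int) - 1) * 2)) (fun x => x) false) (-1)).getD 0 := by
    unfold solution
    simp only
    rw [hD, hvalues]
  -- the sorted value list is nonempty
  have hSne : (PySem.Set.ofList A).map (fun k => ((A.count k : Int) - 1) * 2) ≠ [] := by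
    intro he
    have : PySem.Set.ofList A = [] := by simpa using he
    have hm : A.head h ∈ PySem.Set.ofList A := (PySem.Set.mem_ofList _ _).mpr (List.head_mem h)
    rw [this] at hm
    simp at hm
  set V := (PySem.Set.ofList A).map (fun k => ((A.count k : Int) - 1) * 2) with hVdef
  have hsortne : PySem.List.sorted V (fun x => x) false ≠ [] := by
    simpa [PySem.List.sorted_eq_nil_iff] using hSne
  have hlastget : PySem.List.pyGet? (PySem.List.sorted V (fun x => x) false) (-1)
      = some ((PySem.List.sorted V (fun x => x) false).getLast hsortne) := by
    rw [PySem.List.pyGet?_neg_one, List.getLast?_eq_some_getLast]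
  set L := (PySem.List.sorted V (fun x => x) false).getLast hsortne with hLdef
  have hLV : L ∈ V := by
    rw [← PySem.List.mem_sorted (key := fun x => x) (rev := false)]
    exact hLdef ▸ List.getLast_mem hsortne
  have hub : ∀ y ∈ V, y ≤ L := by
    intro y hy
    apply pairwise_le_getLast _ hsortne y
    · rw [PySem.List.mem_sorted]; exact hy
    · simpa using PySem.List.sorted_pairwise (xs := V) (key := fun x => x)
  obtain ⟨x, hxS, hxL⟩ := List.mem_map.mp hLV
  have hxA : x ∈ A := (PySem.Set.mem_ofList _ _).mp hxS
  refine ⟨(A.count x : Int), ⟨⟨x, hxA, rfl⟩, ?_⟩, ?_⟩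
  · intro y hyA
    have hyV : ((A.count y : Int) - 1) * 2 ∈ V :=
      List.mem_map.mpr ⟨y, (PySem.Set.mem_ofList _ _).mpr hyA, rfl⟩
    have := hub _ hyV
    rw [← hxL] at this
    omega
  · rw [hsol, hlastget]
    simp [← hxL]

-- ----- B-side characterisation -----

def pvStep (st : Int × Int × Int) (x : Int) : Int × Int × Int :=
  let cur := if x = st.1 then st.2.2 + 1 else (1 : Int)
  let best := if cur > st.2.1 then cur else st.2.1
  (x, best, cur)

def pvInv (pre : List Int) (st : Int × Int × Int) : Prop :=
  ∃ h : pre ≠ [],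
    st.1 = pre.getLast h ∧
    st.2.2 = (pre.count (pre.getLast h) : Int) ∧
    (∃ x ∈ pre, (pre.count x : Int) = st.2.1) ∧
    ∀ x ∈ pre, (pre.count x : Int) ≤ st.2.1

theorem pvStep_inv {pre : List Int} {st : Int × Int × Int} {x : Int}
    (hs : (pre ++ [x]).Pairwise (· ≤ ·)) (hI : pvInv pre st) :
    pvInv (pre ++ [x]) (pvStep st x) := by
  obtain ⟨hne, h1, h2, ⟨w, hw, hwc⟩, hub⟩ := hI
  have hpre : pre.Pairwise (· ≤ ·) := (List.pairwise_append.mp hs).1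
  have hle : ∀ y ∈ pre, y ≤ x := fun y hy => (List.pairwise_append.mp hs).2.2 y hy x (by simp)
  have hlast : (pre ++ [x]).getLast (by simp) = x := by simp
  have hcnt : ∀ y : Int, (pre ++ [x]).count y = pre.count y + if y = x then 1 else 0 := by
    intro y
    simp only [List.count_append]
    by_cases h : y = x
    · subst h; simp
    · simp [h, Ne.symm h]
  have hb1 : (1 : Int) ≤ st.2.1 := by
    have := hub _ (List.getLast_mem hne)
    have hcp : 0 < pre.count (pre.getLast hne) := List.count_pos_iff.mpr (List.getLast_mem hne)
    omega
  have hnotmem : ¬ x = st.1 → x ∉ pre := by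
    intro hx hmem
    exact hx (le_antisymm (pairwise_le_getLast hpre hne x hmem |>.trans_eq h1.symm)
      (h1 ▸ hle _ (List.getLast_mem hne)))
  refine ⟨by simp, ?_, ?_, ?_, ?_⟩
  · simp [pvStep, hlast]
  · -- cur component
    simp only [pvStep, hlast]
    by_cases hx : x = st.1
    · rw [if_pos hx, hcnt x, if_pos rfl, h2, ← (hx.trans h1)]
      push_cast; ring
    · rw [if_neg hx, hcnt x, if_pos rfl,
        List.count_eq_zero_of_not_mem (hnotmem hx)]
      simp
  · -- best component: the witness
    simp only [pvStep]
    by_cases hx : x = st.1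
    · have hcx : (pre.count x : Int) = st.2.2 := by rw [h2, ← (hx.trans h1)]
      rw [if_pos hx]
      by_cases hgt : st.2.2 + 1 > st.2.1
      · refine ⟨x, by simp, ?_⟩
        rw [if_pos hgt, hcnt x, if_pos rfl]
        push_cast; omega
      · refine ⟨w, by simp [hw], ?_⟩
        have hwx : ¬ w = x := by
          intro e
          rw [e] at hwc
          omega
        rw [if_neg hgt, hcnt w, if_neg hwx]
        simpa using hwc
    · rw [if_neg hx]
      have hnm := hnotmem hx
      rw [if_neg (by omega : ¬ (1 : Int) > st.2.1)]
      refine ⟨w, by simp [hw], ?_⟩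
      have hwx : ¬ w = x := fun e => hnm (e ▸ hw)
      rw [hcnt w, if_neg hwx]
      simpa using hwc
  · -- best component: the upper bound
    intro y hy
    simp only [pvStep]
    by_cases hyx : y = x
    · obtain rfl := hyx
      rw [hcnt y, if_pos rfl]
      by_cases hx : y = st.1
      · have hcx : (pre.count y : Int) = st.2.2 := by rw [h2, ← (hx.trans h1)]
        rw [if_pos hx]
        by_cases hgt : st.2.2 + 1 > st.2.1
        · rw [if_pos hgt]; push_cast; omega
        · rw [if_neg hgt]; push_cast; omega
      · rw [if_neg hx, List.count_eq_zero_of_not_mem (hnotmem hx),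
          if_neg (by omega : ¬ (1 : Int) > st.2.1)]
        simpa using hb1
    · have hy' : y ∈ pre := by
        rcases List.mem_append.mp hy with h | h
        · exact h
        · simp at h; exact absurd h hyx
      have := hub y hy'
      rw [hcnt y, if_neg hyx]
      have hbb : st.2.1 ≤ if (if x = st.1 then st.2.2 + 1 else 1) > st.2.1
          then (if x = st.1 then st.2.2 + 1 else 1) else st.2.1 := by
        split_ifs <;> omega
      push_cast
      omega

theorem pvFold_inv {l pre : List Int} {st : Int × Int × Int}
    (hs : (pre ++ l).Pairwise (· ≤ ·)) (hI : pvInv pre st) :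
    pvInv (pre ++ l) (l.foldl pvStep st) := by
  induction l generalizing pre st with
  | nil => simpa using hI
  | cons x t ih =>
    have h1 : pre ++ x :: t = (pre ++ [x]) ++ t := by simp
    rw [h1] at hs ⊢
    exact ih hs (pvStep_inv (hs.sublist (List.sublist_append_left _ _)) hI)

theorem solution_alt_char (A : List Int) (h : A ≠ []) :
    ∃ m : Int, IsMaxCount A m ∧ solution_alt A = 2 * (m - 1) := by
  have hsne : PySem.List.sorted A (fun x => x) false ≠ [] := by
    simpa [PySem.List.sorted_eq_nil_iff] using h
  obtain ⟨hd, t, hst⟩ := List.exists_cons_of_ne_nil hsne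
  have hpair : (PySem.List.sorted A (fun x => x) false).Pairwise (· ≤ ·) := by
    simpa using PySem.List.sorted_pairwise (xs := A) (key := fun x => x)
  have hperm : (PySem.List.sorted A (fun x => x) false).Perm A :=
    PySem.List.sorted_perm A (fun x => x) false
  have hinv : pvInv ([hd] ++ t) (t.foldl pvStep (hd, 1, 1)) := by
    apply pvFold_inv
    · rw [List.singleton_append, ← hst]; exact hpair
    · refine ⟨by simp, by simp, by simp, ⟨hd, by simp, by simp⟩, ?_⟩
      intro x hx
      simp at hx
      subst hx
      simp
  rw [List.singleton_append, ← hst] at hinv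
  obtain ⟨hne2, _, _, ⟨xw, hxw, hxwc⟩, hub2⟩ := hinv
  have halt : solution_alt A = 2 * ((t.foldl pvStep (hd, 1, 1)).2.1 - 1) := by
    simp only [solution_alt, hst, PySem.List.slice_from_one, List.tail_cons,
      PySem.List.pyGetD_zero_cons]
    rfl
  refine ⟨(t.foldl pvStep (hd, 1, 1)).2.1, ⟨⟨xw, hperm.mem_iff.mp hxw, ?_⟩, ?_⟩, halt⟩
  · rw [← hperm.count_eq]; exact hxwc
  · intro y hy
    rw [← hperm.count_eq]
    exact hub2 y (hperm.mem_iff.mpr hy)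

-- ===== VERDICT (by name: the statement is the Claim_ definition above) =====
theorem solution_spec : Claim_equal_solution := by
  intro A _ hpre
  unfold Spec_solution
  obtain ⟨m, hm, hA⟩ := solution_char A hpre
  obtain ⟨m', hm', hB⟩ := solution_alt_char A hpre
  have : m = m' := isMaxCount_unique hm hm'
  subst this
  rw [hA, hB]; ring
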